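-- pv_equiv track=rewrite | github.com/koskin17/MyEducation | Softserve/UA-130 Advanced Python with Django/Sprint 02/task1.py | double_string
-- ===== SOURCE A (Python) =====
-- def double_string(data):
--     set_word_from_data = set(data)  # Преобразуем список в множество для быстрого поиска O(1)
--     counter = 0
--
--     for word in data:
--         # Проверяем, можно ли представить слово в виде двух других слов из списка
--         for i in range(1, len(word)):  # Начинаем с 1, чтобы избежать пустых подстрок
--             prefix, suffix = word[:i], word[i:]
--             if prefix in set_word_from_data and suffix in set_word_from_data:
--                 counter += 1
--                 break  # Если нашли подходящее разбиение, переходим к следующему слову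
--
--     return counter
-- ===== SOURCE B (Python) =====
-- def double_string(data):
--     words = {w for w in set(data) if w}
--     combos = {a + b for a in words for b in words}
--     return sum(1 for w in data if w in combos)
-- ===== Notes on version B (the rewrite author's own statement) =====
-- stated objective: alternative
-- what changed: Instead of scanning every split point of each word against the word set, B first builds the set of all concatenations of two nonempty list words and then counts list elements by a single membership pass.
import Mathlib
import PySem

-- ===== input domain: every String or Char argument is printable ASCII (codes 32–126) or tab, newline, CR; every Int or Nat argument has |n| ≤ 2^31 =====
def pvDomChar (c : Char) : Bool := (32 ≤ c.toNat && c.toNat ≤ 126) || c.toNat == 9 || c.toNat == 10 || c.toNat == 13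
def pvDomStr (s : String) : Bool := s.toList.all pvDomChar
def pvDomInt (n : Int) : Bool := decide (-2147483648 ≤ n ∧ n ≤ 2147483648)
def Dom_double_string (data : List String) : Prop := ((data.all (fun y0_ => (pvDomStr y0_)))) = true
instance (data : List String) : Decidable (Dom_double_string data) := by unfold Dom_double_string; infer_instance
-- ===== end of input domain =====

-- B replaces A's per-word scan over split points by building the set of all
-- concatenations of two nonempty list words once, then one membership pass (alternative decomposition, same behaviour).

-- ===== PORT A =====
-- inner 'for i in range(1, len(word))' with break: first split point whose halves are both in the set
def dsCheck (s : PySem.Set String) (word : String) : List Int → Bool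
  | [] => false
  | i :: rest =>
      if PySem.Set.contains s (PySem.Str.slice word none (some i)) &&
         PySem.Set.contains s (PySem.Str.slice word (some i) none)
      then true else dsCheck s word rest

def double_string (data : List String) : Int :=
  let setWordFromData := PySem.Set.ofList data
  data.foldl (fun counter word =>
    if dsCheck setWordFromData word (PySem.List.pyRange 1 (PySem.Str.len word) 1) then counter + 1
    else counter) 0

-- ===== PORT B =====
def double_string_alt (data : List String) : Int :=
  let words : PySem.Set String := (PySem.Set.ofList data).filter (fun w => !(w == ""))
  let combos : PySem.Set String :=
    words.foldl (fun acc a => words.foldl (fun acc b => PySem.Set.add acc (a ++ b)) acc)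
      PySem.Set.empty
  data.foldl (fun c w => if PySem.Set.contains combos w then c + 1 else c) 0

-- ===== PRECONDITION & SPEC =====
def Spec_double_string (data : List String) (out : Int) : Prop := out = double_string_alt data
instance (data : List String) (out : Int) : Decidable (Spec_double_string data out) := by unfold Spec_double_string; infer_instance

-- ===== CLAIM (what is proved, stated in full; the proofs are below) =====
def Claim_equal_double_string : Prop := ∀ (data : List String), Dom_double_string data → Spec_double_string data (double_string data)

-- ===== LEMMAS AND PROOFS =====

lemma toList_ne_nil_of_ne_empty {a : String} (h : a ≠ "") : a.toList ≠ [] := by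
  intro hn
  exact h (String.toList_inj.mp hn)

lemma dsCheck_iff (s : PySem.Set String) (w : String) (idxs : List Int) :
    dsCheck s w idxs = true ↔
      ∃ i ∈ idxs, PySem.Str.slice w none (some i) ∈ s ∧ PySem.Str.slice w (some i) none ∈ s := by
  induction idxs with
  | nil => simp [dsCheck]
  | cons i rest ih =>
      by_cases h : (PySem.Set.contains s (PySem.Str.slice w none (some i)) &&
          PySem.Set.contains s (PySem.Str.slice w (some i) none)) = true
      · simp only [dsCheck, h, if_true]
        simp only [Bool.and_eq_true, PySem.Set.contains_iff] at h
        simp [h]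
      · simp only [dsCheck, h]
        simp only [Bool.false_eq_true, if_false, ih]
        simp only [Bool.and_eq_true, PySem.Set.contains_iff] at h
        constructor
        · rintro ⟨j, hj, hm⟩; exact ⟨j, by simp [hj], hm⟩
        · rintro ⟨j, hj, hm⟩
          rcases List.mem_cons.mp hj with rfl | hj'
          · exact absurd hm h
          · exact ⟨j, hj', hm⟩

lemma mem_combos_fold (l ws : List String) (acc : PySem.Set String) (y : String) :
    y ∈ l.foldl (fun acc a => ws.foldl (fun acc b => PySem.Set.add acc (a ++ b)) acc) acc ↔
      y ∈ acc ∨ ∃ a ∈ l, ∃ b ∈ ws, y = a ++ b := by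
  induction l generalizing acc with
  | nil => simp
  | cons a t ih =>
      simp only [List.foldl_cons, ih, PySem.Set.mem_foldl_add (f := fun b => a ++ b)]
      constructor
      · rintro (⟨h | ⟨b, hb, rfl⟩⟩ | ⟨a', ha', b, hb, rfl⟩)
        · exact Or.inl h
        · exact Or.inr ⟨a, by simp, b, hb, rfl⟩
        · exact Or.inr ⟨a', by simp [ha'], b, hb, rfl⟩
      · rintro (h | ⟨a', ha', b, hb, rfl⟩)
        · exact Or.inl (Or.inl h)
        · rcases List.mem_cons.mp ha' with rfl | ha''
          · exact Or.inl (Or.inr ⟨b, hb, rfl⟩)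
          · exact Or.inr ⟨a', ha'', b, hb, rfl⟩

lemma mem_filter_nonempty (data : List String) (a : String) :
    a ∈ (PySem.Set.ofList data).filter (fun w => !(w == "")) ↔
      a ∈ PySem.Set.ofList data ∧ a ≠ "" := by
  simp [List.mem_filter]

-- the heart: A's per-word split scan succeeds exactly when the word is in B's combo set
lemma word_iff (data : List String) (w : String) :
    dsCheck (PySem.Set.ofList data) w (PySem.List.pyRange 1 (PySem.Str.len w) 1) =
      PySem.Set.contains
        (((PySem.Set.ofList data).filter (fun x => !(x == ""))).foldl
          (fun acc a => ((PySem.Set.ofList data).filter (fun x => !(x == ""))).foldl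
            (fun acc b => PySem.Set.add acc (a ++ b)) acc)
          PySem.Set.empty) w := by
  rw [Bool.eq_iff_iff, dsCheck_iff, PySem.Set.contains_iff, mem_combos_fold]
  constructor
  · rintro ⟨i, hi, hpre, hsuf⟩
    rw [PySem.List.mem_pyRange_one] at hi
    obtain ⟨h1, h2⟩ := hi
    rw [PySem.Str.len_eq] at h2
    have h0 : (0:Int) ≤ i := by omega
    have hpl : (PySem.Str.slice w none (some i)).toList = w.toList.take i.toNat := by
      simp [PySem.Str.toList_slice, PySem.Chars.slice_eq_listSlice, PySem.List.slice_to _ h0]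
    have hsl : (PySem.Str.slice w (some i) none).toList = w.toList.drop i.toNat := by
      simp [PySem.Str.toList_slice, PySem.Chars.slice_eq_listSlice, PySem.List.slice_from _ h0]
    refine Or.inr ⟨PySem.Str.slice w none (some i), ?_,
      PySem.Str.slice w (some i) none, ?_, ?_⟩
    · rw [mem_filter_nonempty]
      refine ⟨hpre, ?_⟩
      intro he
      rw [he] at hpl
      have h3 := congrArg List.length hpl
      simp only [String.toList_empty, List.length_nil, List.length_take] at h3
      omega
    · rw [mem_filter_nonempty]
      refine ⟨hsuf, ?_⟩
      intro he
      rw [he] at hsl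
      have h3 := congrArg List.length hsl
      simp only [String.toList_empty, List.length_nil, List.length_drop] at h3
      omega
    · apply String.toList_inj.mp
      rw [String.toList_append, hpl, hsl, List.take_append_drop]
  · rintro (h | ⟨a, ha, b, hb, rfl⟩)
    · simp [PySem.Set.empty] at h
    · rw [mem_filter_nonempty] at ha hb
      obtain ⟨ha, hane⟩ := ha
      obtain ⟨hb, hbne⟩ := hb
      have hal := toList_ne_nil_of_ne_empty hane
      have hbl := toList_ne_nil_of_ne_empty hbne
      have hcat : (a ++ b).toList = a.toList ++ b.toList := String.toList_append ..
      refine ⟨(a.toList.length : Int), ?_, ?_, ?_⟩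
      · rw [PySem.List.mem_pyRange_one, PySem.Str.len_eq, hcat]
        constructor
        · have : a.toList.length ≠ 0 := by simpa using hal
          omega
        · have : b.toList.length ≠ 0 := by simpa using hbl
          simp only [List.length_append]
          omega
      · have : PySem.Str.slice (a ++ b) none (some (a.toList.length : Int)) = a := by
          apply String.toList_inj.mp
          simp [PySem.Str.toList_slice, PySem.Chars.slice_eq_listSlice,
            PySem.List.slice_to_natCast, hcat]
        rw [this]; exact ha
      · have : PySem.Str.slice (a ++ b) (some (a.toList.length : Int)) none = b := by
          apply String.toList_inj.mp
          simp [PySem.Str.toList_slice, PySem.Chars.slice_eq_listSlice,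
            PySem.List.slice_from_natCast, hcat]
        rw [this]; exact hb
      
-- ===== VERDICT (by name: the statement is the Claim_ definition above) =====
theorem double_string_spec : Claim_equal_double_string := by
  intro data _
  unfold Spec_double_string double_string double_string_alt
  exact PySem.List.foldl_congr_mem data _ _ 0
    (fun acc w _ => by rw [word_iff data w])
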